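-- pv_equiv track=rewrite | github.com/joshuaburkhart/BioinformaticsAlgorithms | final_proj/src/lib/AltDensity.py | max_in_sorted_t
-- ===== SOURCE A (Python) =====
-- def max_in_sorted_t(exon_idcs, alt_set, window_size, tid):
--     max_window_alts = set()
--     if len(exon_idcs) < window_size: window_size = len(exon_idcs)
--     for window_pos in range(0, len(exon_idcs) - window_size):
--         cur_window_alts = set()
--         [cur_window_alts.add(nt_pos) for nt_pos in range(exon_idcs[window_pos], exon_idcs[window_pos + window_size]) if
--          nt_pos in alt_set]
--         if len(cur_window_alts) > len(max_window_alts): max_window_alts = cur_window_alts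
--     max_window_alts.add(tid)
--     return max_window_alts
-- ===== SOURCE B (Python) =====
-- def max_in_sorted_t(exon_idcs, alt_set, window_size, tid):
--     n = len(exon_idcs)
--     if n < window_size:
--         window_size = n
--     alts = sorted(set(alt_set))  # distinct alt positions, ascending, computed once
--     best = []
--     for wp in range(0, n - window_size):
--         lo = exon_idcs[wp]
--         hi = exon_idcs[wp + window_size]
--         cur = [x for x in alts if lo <= x < hi]
--         if len(cur) > len(best):
--             best = cur
--     out = set(best)
--     out.add(tid)
--     return out
-- ===== Notes on version B (the rewrite author's own statement) =====
-- stated objective: faster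
-- what changed: Instead of scanning every integer position in each window's interval and testing list membership, B dedups and sorts the alt positions once and, per window, filters that small sorted list.
import Mathlib
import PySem

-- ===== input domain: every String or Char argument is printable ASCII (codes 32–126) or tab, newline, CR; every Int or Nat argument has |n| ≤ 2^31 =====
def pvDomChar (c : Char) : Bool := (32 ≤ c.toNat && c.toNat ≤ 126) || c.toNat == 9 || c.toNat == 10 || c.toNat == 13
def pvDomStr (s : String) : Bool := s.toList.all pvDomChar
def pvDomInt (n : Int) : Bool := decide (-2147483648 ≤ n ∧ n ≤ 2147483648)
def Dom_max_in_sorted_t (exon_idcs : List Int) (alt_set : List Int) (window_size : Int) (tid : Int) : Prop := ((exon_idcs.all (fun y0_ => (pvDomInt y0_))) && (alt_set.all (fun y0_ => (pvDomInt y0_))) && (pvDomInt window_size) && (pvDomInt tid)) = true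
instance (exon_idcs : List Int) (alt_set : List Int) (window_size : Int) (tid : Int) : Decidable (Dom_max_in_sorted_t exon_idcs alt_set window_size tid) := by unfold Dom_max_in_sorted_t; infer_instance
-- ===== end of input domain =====

-- B dedups+sorts the alt positions once and filters that small list per window, instead of
-- A's scan over every integer position of each window's interval (objective: faster).

-- ===== PORT A =====
def max_in_sorted_t (exon_idcs : List Int) (alt_set : List Int) (window_size : Int) (tid : Int) : List Int :=
  -- if len(exon_idcs) < window_size: window_size = len(exon_idcs)
  let ws : Int := if (exon_idcs.length : Int) < window_size then (exon_idcs.length : Int) else window_size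
  -- for window_pos in range(0, len(exon_idcs) - window_size): build cur_window_alts, keep the larger
  let maxw : PySem.Set Int :=
    (PySem.List.pyRange 0 ((exon_idcs.length : Int) - ws) 1).foldl
      (fun maxw wp =>
        let cur : PySem.Set Int :=
          (PySem.List.pyRange (PySem.List.pyGetD exon_idcs wp 0)
                              (PySem.List.pyGetD exon_idcs (wp + ws) 0) 1).foldl
            (fun s nt_pos => if alt_set.contains nt_pos then PySem.Set.add s nt_pos else s)
            PySem.Set.empty
        if cur.length > maxw.length then cur else maxw)
      PySem.Set.empty
  PySem.Set.add maxw tid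

-- ===== PORT B =====
def max_in_sorted_t_alt (exon_idcs : List Int) (alt_set : List Int) (window_size : Int) (tid : Int) : List Int :=
  let n : Int := exon_idcs.length
  let ws : Int := if n < window_size then n else window_size
  -- alts = sorted(set(alt_set))
  let alts : List Int := PySem.List.sorted (PySem.Set.ofList alt_set) (fun x => x) false
  let best : List Int :=
    (PySem.List.pyRange 0 (n - ws) 1).foldl
      (fun best wp =>
        let lo := PySem.List.pyGetD exon_idcs wp 0
        let hi := PySem.List.pyGetD exon_idcs (wp + ws) 0
        let cur := alts.filter (fun x => decide (lo ≤ x) && decide (x < hi))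
        if cur.length > best.length then cur else best)
      []
  PySem.Set.add (PySem.Set.ofList best) tid

-- ===== PRECONDITION & SPEC =====
-- Pre_ excludes window_size < 0, on which A (and B) raise IndexError from out-of-range window indices.
def Pre_max_in_sorted_t (exon_idcs : List Int) (alt_set : List Int) (window_size : Int) (tid : Int) : Prop :=
  0 ≤ window_size
instance (exon_idcs : List Int) (alt_set : List Int) (window_size : Int) (tid : Int) : Decidable (Pre_max_in_sorted_t exon_idcs alt_set window_size tid) := by unfold Pre_max_in_sorted_t; infer_instance
def pvWitness_max_in_sorted_t : List Int × List Int × Int × Int := ([2, 5, 9, 12], [3, 6, 10], 2, 7)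

def Spec_max_in_sorted_t (exon_idcs : List Int) (alt_set : List Int) (window_size : Int) (tid : Int) (out : List Int) : Prop := out = max_in_sorted_t_alt exon_idcs alt_set window_size tid
instance (exon_idcs : List Int) (alt_set : List Int) (window_size : Int) (tid : Int) (out : List Int) : Decidable (Spec_max_in_sorted_t exon_idcs alt_set window_size tid out) := by unfold Spec_max_in_sorted_t; infer_instance

-- ===== CLAIM (what is proved, stated in full; the proofs are below) =====
def Claim_equal_max_in_sorted_t : Prop := ∀ (exon_idcs : List Int) (alt_set : List Int) (window_size : Int) (tid : Int), Dom_max_in_sorted_t exon_idcs alt_set window_size tid → Pre_max_in_sorted_t exon_idcs alt_set window_size tid → Spec_max_in_sorted_t exon_idcs alt_set window_size tid (max_in_sorted_t exon_idcs alt_set window_size tid)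

-- ===== LEMMAS AND PROOFS =====

-- A fold that set-adds the elements of a duplicate-free list that pass p, starting from an
-- accumulator disjoint from the list, appends exactly the filtered list.
theorem foldl_setAdd_filter {l acc : List Int} {p : Int → Bool}
    (hnd : l.Nodup) (hdisj : ∀ x ∈ l, x ∉ acc) :
    l.foldl (fun s nt => if p nt then PySem.Set.add s nt else s) acc = acc ++ l.filter p := by
  induction l generalizing acc with
  | nil => simp
  | cons a l ih =>
    have hna : a ∉ acc := hdisj a (by simp)
    have hnd' : l.Nodup := hnd.of_cons
    by_cases hp : p a
    · have hadd : PySem.Set.add acc a = acc ++ [a] := by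
        simp [PySem.Set.add, PySem.Set.contains, hna]
      simp only [List.foldl_cons, hp, if_pos]
      rw [hadd, ih hnd' (by
        intro x hx
        simp only [List.mem_append, List.mem_singleton]
        rintro (h | rfl)
        · exact hdisj x (by simp [hx]) h
        · exact (List.nodup_cons.mp hnd).1 hx)]
      simp [hp]
    · simp only [List.foldl_cons, hp, if_neg, Bool.false_eq_true, not_false_iff]
      rw [ih hnd' (fun x hx => hdisj x (by simp [hx]))]
      simp [hp]

-- The inner window computation of A equals the inner window computation of B.
theorem win_eq (alt_set : List Int) (lo hi : Int) :
    (PySem.List.pyRange lo hi 1).foldl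
        (fun s nt => if alt_set.contains nt then PySem.Set.add s nt else s) PySem.Set.empty
      = (PySem.List.sorted (PySem.Set.ofList alt_set) (fun x => x) false).filter
          (fun x => decide (lo ≤ x) && decide (x < hi)) := by
  have hA : (PySem.List.pyRange lo hi 1).foldl
      (fun s nt => if alt_set.contains nt then PySem.Set.add s nt else s) PySem.Set.empty
      = (PySem.List.pyRange lo hi 1).filter (fun nt => alt_set.contains nt) := by
    have := foldl_setAdd_filter (l := PySem.List.pyRange lo hi 1) (acc := [])
      (p := fun nt => alt_set.contains nt) (PySem.List.nodup_pyRange_one lo hi)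
      (by intro x _ h; simp at h)
    simpa [PySem.Set.empty] using this
  rw [hA]
  -- both sides are strictly increasing lists with the same membership
  set L := (PySem.List.pyRange lo hi 1).filter (fun nt => alt_set.contains nt) with hL
  set R := (PySem.List.sorted (PySem.Set.ofList alt_set) (fun x => x) false).filter
      (fun x => decide (lo ≤ x) && decide (x < hi)) with hR
  have hLp : L.Pairwise (· < ·) := (PySem.List.pairwise_lt_pyRange_one lo hi).filter _
  have hRp : R.Pairwise (· < ·) := (PySem.List.sorted_ofList_pairwise_lt alt_set).filter _
  have hmem : ∀ x : Int, x ∈ L ↔ x ∈ R := by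
    intro x
    simp [hL, hR, List.mem_filter, PySem.List.mem_pyRange_one, PySem.List.mem_sorted,
      PySem.Set.mem_ofList]
    tauto
  have hperm : R.Perm L := by
    rw [List.perm_ext_iff_of_nodup (hRp.imp ne_of_lt) (hLp.imp ne_of_lt)]
    intro a; exact (hmem a).symm
  calc L = PySem.List.sorted L (fun x => x) false :=
        (PySem.List.sorted_eq_self_of_pairwise L (fun x => x) (hLp.imp le_of_lt)).symm
    _ = R := PySem.List.sorted_eq_of_perm_of_pairwise_lt L R (fun x => x) hperm hRp

-- B's running 'best' stays duplicate-free through the window loop.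
theorem best_nodup (alts : List Int) (halts : alts.Pairwise (· < ·))
    (f : Int → Int → Int × Int) (l : List Int) (init : List Int) (hinit : init.Nodup) :
    (l.foldl
      (fun best wp =>
        let cur := alts.filter (fun x => decide ((f wp 0).1 ≤ x) && decide (x < (f wp 0).2))
        if cur.length > best.length then cur else best) init).Nodup := by
  induction l generalizing init with
  | nil => exact hinit
  | cons a l ih =>
    apply ih
    dsimp only
    split
    · exact ((halts.filter _).imp ne_of_lt)
    · exact hinit

theorem max_in_sorted_t_eq (exon_idcs : List Int) (alt_set : List Int) (window_size : Int) (tid : Int) :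
    max_in_sorted_t exon_idcs alt_set window_size tid
      = max_in_sorted_t_alt exon_idcs alt_set window_size tid := by
  unfold max_in_sorted_t max_in_sorted_t_alt
  simp only []
  set ws : Int := if (exon_idcs.length : Int) < window_size then (exon_idcs.length : Int) else window_size with hws
  set alts : List Int := PySem.List.sorted (PySem.Set.ofList alt_set) (fun x => x) false with halts
  have hstep : ∀ (acc : List Int) (wp : Int),
      (fun (maxw : PySem.Set Int) wp =>
        let cur : PySem.Set Int :=
          (PySem.List.pyRange (PySem.List.pyGetD exon_idcs wp 0)
                              (PySem.List.pyGetD exon_idcs (wp + ws) 0) 1).foldl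
            (fun s nt_pos => if alt_set.contains nt_pos then PySem.Set.add s nt_pos else s)
            PySem.Set.empty
        if cur.length > maxw.length then cur else maxw) acc wp
      = (fun (best : List Int) wp =>
        let lo := PySem.List.pyGetD exon_idcs wp 0
        let hi := PySem.List.pyGetD exon_idcs (wp + ws) 0
        let cur := alts.filter (fun x => decide (lo ≤ x) && decide (x < hi))
        if cur.length > best.length then cur else best) acc wp := by
    intro acc wp
    simp only [halts, win_eq]
  have hfold :
      (PySem.List.pyRange 0 ((exon_idcs.length : Int) - ws) 1).foldl
        (fun (maxw : PySem.Set Int) wp =>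
          let cur : PySem.Set Int :=
            (PySem.List.pyRange (PySem.List.pyGetD exon_idcs wp 0)
                                (PySem.List.pyGetD exon_idcs (wp + ws) 0) 1).foldl
              (fun s nt_pos => if alt_set.contains nt_pos then PySem.Set.add s nt_pos else s)
              PySem.Set.empty
          if cur.length > maxw.length then cur else maxw) PySem.Set.empty
      = (PySem.List.pyRange 0 ((exon_idcs.length : Int) - ws) 1).foldl
        (fun (best : List Int) wp =>
          let lo := PySem.List.pyGetD exon_idcs wp 0
          let hi := PySem.List.pyGetD exon_idcs (wp + ws) 0
          let cur := alts.filter (fun x => decide (lo ≤ x) && decide (x < hi))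
          if cur.length > best.length then cur else best) [] := by
    have : PySem.Set.empty = ([] : List Int) := rfl
    rw [this]
    apply PySem.List.foldl_congr_mem
    intro acc wp _
    exact hstep acc wp
  rw [hfold]
  -- Set.ofList of the duplicate-free result is itself
  congr 1
  set best := (PySem.List.pyRange 0 ((exon_idcs.length : Int) - ws) 1).foldl
        (fun (best : List Int) wp =>
          let lo := PySem.List.pyGetD exon_idcs wp 0
          let hi := PySem.List.pyGetD exon_idcs (wp + ws) 0
          let cur := alts.filter (fun x => decide (lo ≤ x) && decide (x < hi))
          if cur.length > best.length then cur else best) [] with hbest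
  have hnd : best.Nodup := by
    rw [hbest]
    exact best_nodup alts (PySem.List.sorted_ofList_pairwise_lt alt_set)
      (fun wp _ => (PySem.List.pyGetD exon_idcs wp 0, PySem.List.pyGetD exon_idcs (wp + ws) 0))
      _ [] (by simp)
  -- ofList of a Nodup list is the list itself
  rw [PySem.Set.ofList_eq_foldl]
  have h := foldl_setAdd_filter (l := best) (acc := []) (p := fun _ => true) hnd (by simp)
  simpa using h.symm

-- ===== VERDICT (by name: the statement is the Claim_ definition above) =====
theorem max_in_sorted_t_spec : Claim_equal_max_in_sorted_t := by
  intro exon_idcs alt_set window_size tid _ _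
  unfold Spec_max_in_sorted_t
  exact max_in_sorted_t_eq exon_idcs alt_set window_size tid
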